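-- pv_equiv track=rewrite | github.com/monam2/Algorithms | im/2567색종이2.py | calculate
-- ===== SOURCE A (Python) =====
-- def calculate(arr):
--     length = 0
--     for x in range(len(arr)):
--         before = 0
--         for y in range(len(arr[x])):
--             if not arr[x][y] == before:
--                 length += 1
--             before = arr[x][y]
--
--     return length
-- ===== SOURCE B (Python) =====
-- def calculate(arr):
--     # Complement counting: transitions = total cells - cells that equal their
--     # predecessor. A cell matches its predecessor if it equals the cell to its
--     # left, or (for the first cell of a row) if it is 0.
--     total_cells = sum(len(row) for row in arr)
--     eq_pairs = sum(sum(1 for a, b in zip(row, row[1:]) if a == b) for row in arr)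
--     zero_starts = sum(1 for row in arr if row and row[0] == 0)
--     return total_cells - eq_pairs - zero_starts
-- ===== Notes on version B (the rewrite author's own statement) =====
-- stated objective: alternative
-- what changed: Counts by complement in three staged passes: total cell count minus the number of equal adjacent pairs (via zip(row, row[1:])) minus the number of rows starting with 0, instead of A's single pass incrementing on each mismatch with a 'before' variable.
import Mathlib
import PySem

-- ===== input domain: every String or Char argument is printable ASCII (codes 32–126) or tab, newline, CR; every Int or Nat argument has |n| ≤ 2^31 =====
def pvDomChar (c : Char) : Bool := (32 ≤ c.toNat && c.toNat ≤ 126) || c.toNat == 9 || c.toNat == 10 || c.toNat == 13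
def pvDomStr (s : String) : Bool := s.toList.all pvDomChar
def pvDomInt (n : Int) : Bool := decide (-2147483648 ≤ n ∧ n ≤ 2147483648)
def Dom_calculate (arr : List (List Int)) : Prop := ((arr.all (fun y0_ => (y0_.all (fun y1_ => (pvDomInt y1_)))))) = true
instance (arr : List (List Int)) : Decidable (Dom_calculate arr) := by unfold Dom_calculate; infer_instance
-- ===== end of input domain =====

-- B counts by complement (total cells minus equal-adjacent pairs minus rows starting with 0) in staged passes instead of A's single 'before'-variable mismatch loop; same cost, alternative decomposition.

-- ===== PORT A =====
-- inner loop state: (length so far, before); before is reset to 0 at each row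
def calculate (arr : List (List Int)) : Int :=
  arr.foldl
    (fun length row =>
      (row.foldl
        (fun (st : Int × Int) v =>
          (if v == st.2 then st.1 else st.1 + 1, v))
        (length, 0)).1)
    0

-- ===== PORT B =====
-- sum(1 for a, b in zip(row, row[1:]) if a == b); row[1:] on a list = drop 1 (exact: nonnegative in-range start)
def pvEqPairs (row : List Int) : Int :=
  (row.zip (row.drop 1)).foldl (fun s p => if p.1 = p.2 then s + 1 else s) 0

def calculate_alt (arr : List (List Int)) : Int :=
  let totalCells := arr.foldl (fun s row => s + (row.length : Int)) 0
  let eqPairs := arr.foldl (fun s row => s + pvEqPairs row) 0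
  let zeroStarts := arr.foldl (fun s row => s + (if row.head? = some 0 then (1 : Int) else 0)) 0
  totalCells - eqPairs - zeroStarts

-- ===== PRECONDITION & SPEC =====
def Spec_calculate (arr : List (List Int)) (out : Int) : Prop := out = calculate_alt arr
instance (arr : List (List Int)) (out : Int) : Decidable (Spec_calculate arr out) := by unfold Spec_calculate; infer_instance

-- ===== CLAIM (what is proved, stated in full; the proofs are below) =====
def Claim_equal_calculate : Prop := ∀ (arr : List (List Int)), Dom_calculate arr → Spec_calculate arr (calculate arr)

-- ===== LEMMAS AND PROOFS =====
-- accumulator shift for the pair-counting fold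
theorem pv_pairs_shift (l : List (Int × Int)) (c : Int) :
    l.foldl (fun s p => if p.1 = p.2 then s + 1 else s) c
      = c + l.foldl (fun s p => if p.1 = p.2 then s + 1 else s) 0 := by
  induction l generalizing c with
  | nil => simp
  | cons p t ih =>
    simp only [List.foldl_cons]
    rw [ih, ih (if p.1 = p.2 then 0 + 1 else 0)]
    split_ifs <;> ring

theorem pv_eqPairs_cons (v : Int) (t : List Int) :
    pvEqPairs (v :: t)
      = (match t.head? with | some w => if v = w then (1 : Int) else 0 | none => 0) + pvEqPairs t := by
  cases t with
  | nil => simp [pvEqPairs]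
  | cons w u =>
    simp only [pvEqPairs, List.drop_one, List.zip_cons_cons, List.tail_cons, List.foldl_cons,
      List.head?_cons]
    rw [pv_pairs_shift]
    split_ifs <;> simp

-- A's inner row fold counted by complement
theorem pv_row (row : List Int) (L b : Int) :
    (row.foldl (fun (st : Int × Int) v => (if v == st.2 then st.1 else st.1 + 1, v)) (L, b)).1
      = L + row.length - pvEqPairs row - (if row.head? = some b then 1 else 0) := by
  induction row generalizing L b with
  | nil => simp [pvEqPairs]
  | cons v t ih =>
    simp only [List.foldl_cons, List.length_cons, List.head?_cons]
    rw [ih, pv_eqPairs_cons]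
    cases t with
    | nil =>
      by_cases h : v = b <;> simp [pvEqPairs, h, beq_iff_eq]
    | cons w u =>
      simp only [List.head?_cons, Option.some.injEq, beq_iff_eq, List.length_cons]
      generalize pvEqPairs (w :: u) = P
      push_cast
      split_ifs <;> omega

-- A's outer fold as init + sum of per-row complement counts
theorem pv_foldA (arr : List (List Int)) (c : Int) :
    arr.foldl
        (fun length row =>
          (row.foldl (fun (st : Int × Int) v =>
            (if v == st.2 then st.1 else st.1 + 1, v)) (length, 0)).1) c
      = c + (arr.map (fun row => (row.length : Int) - pvEqPairs row
          - (if row.head? = some 0 then (1 : Int) else 0))).sum := by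
  induction arr generalizing c with
  | nil => simp
  | cons r t ih =>
    simp only [List.foldl_cons, List.map_cons, List.sum_cons]
    rw [pv_row, ih]
    ring

-- additive foldl is init + sum of mapped values
theorem pv_fold_sum (f : List Int → Int) (arr : List (List Int)) (c : Int) :
    arr.foldl (fun s row => s + f row) c = c + (arr.map f).sum := by
  induction arr generalizing c with
  | nil => simp
  | cons r t ih => simp [List.foldl_cons, ih, add_assoc]

-- linearity of the summed complement
theorem pv_sum_sub (arr : List (List Int)) :
    (arr.map (fun row => (row.length : Int) - pvEqPairs row
        - (if row.head? = some 0 then (1 : Int) else 0))).sum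
      = (arr.map (fun row => (row.length : Int))).sum
        - (arr.map pvEqPairs).sum
        - (arr.map (fun row => (if row.head? = some 0 then (1 : Int) else 0))).sum := by
  induction arr with
  | nil => simp
  | cons r t ih => simp only [List.map_cons, List.sum_cons]; rw [ih]; ring

theorem calculate_spec : Claim_equal_calculate := by
  intro arr _
  show calculate arr = calculate_alt arr
  unfold calculate calculate_alt
  rw [pv_foldA, pv_fold_sum, pv_fold_sum, pv_fold_sum, pv_sum_sub]
  ring
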